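-- pv_equiv track=rewrite | github.com/Nate-ryan-7690/Intel | src/exporter.py | _most_restrictive_tlp
-- ===== SOURCE A (Python) =====
-- TLP_ORDER = ["TLP:WHITE", "TLP:GREEN", "TLP:AMBER", "TLP:RED"]
--
-- def _most_restrictive_tlp(tlp_values):
--     """Return the most restrictive TLP from a list of TLP strings."""
--     highest = 0
--     for tlp in tlp_values:
--         try:
--             idx = TLP_ORDER.index(tlp)
--             if idx > highest:
--                 highest = idx
--         except ValueError:
--             pass
--     return TLP_ORDER[highest]
-- ===== SOURCE B (Python) =====
-- TLP_ORDER = ["TLP:WHITE", "TLP:GREEN", "TLP:AMBER", "TLP:RED"]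
--
-- def _most_restrictive_tlp(tlp_values):
--     """Return the most restrictive TLP from a list of TLP strings."""
--     for label in reversed(TLP_ORDER):
--         if label in tlp_values:
--             return label
--     return TLP_ORDER[0]
-- ===== Notes on version B (the rewrite author's own statement) =====
-- stated objective: idiomatic
-- what changed: Instead of scanning the input once while tracking the maximal TLP_ORDER index via list.index inside try/except, B iterates over TLP_ORDER from most to least restrictive and returns the first label present in the input (membership test), with TLP:WHITE as fallback.
import Mathlib
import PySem

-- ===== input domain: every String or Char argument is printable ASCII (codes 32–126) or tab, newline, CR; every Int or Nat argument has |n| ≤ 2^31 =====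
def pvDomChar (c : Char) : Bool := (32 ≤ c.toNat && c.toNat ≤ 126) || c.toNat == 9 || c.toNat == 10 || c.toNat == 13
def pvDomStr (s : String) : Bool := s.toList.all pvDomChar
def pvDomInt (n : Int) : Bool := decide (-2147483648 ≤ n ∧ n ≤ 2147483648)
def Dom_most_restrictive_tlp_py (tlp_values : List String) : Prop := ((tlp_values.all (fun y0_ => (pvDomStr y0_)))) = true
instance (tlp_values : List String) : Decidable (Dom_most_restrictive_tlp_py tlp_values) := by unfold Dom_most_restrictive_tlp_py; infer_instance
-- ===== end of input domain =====

-- B changes the decomposition: it walks the fixed priority table from most to least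
-- restrictive and does a membership test, instead of A's single pass over the input
-- tracking the maximal TLP_ORDER index; same cost, more idiomatic.

-- TLP_ORDER
def tlpOrder : List String := ["TLP:WHITE", "TLP:GREEN", "TLP:AMBER", "TLP:RED"]

-- ===== PORT A =====
-- one loop step: try TLP_ORDER.index(tlp); if idx > highest: highest = idx; ValueError → pass
def tlpStep (highest : Nat) (tlp : String) : Nat :=
  match PySem.List.index? tlpOrder tlp with
  | some idx => if idx > highest then idx else highest
  | none => highest

def most_restrictive_tlp_py (tlp_values : List String) : String :=
  let highest := tlp_values.foldl tlpStep 0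
  tlpOrder.getD highest ""   -- TLP_ORDER[highest]; highest < 4 always, so in range

-- ===== PORT B =====
-- for label in reversed(TLP_ORDER): if label in tlp_values: return label
def tlpScan (order : List String) (tlp_values : List String) : String :=
  match order with
  | [] => tlpOrder.getD 0 ""   -- return TLP_ORDER[0]
  | label :: rest => if label ∈ tlp_values then label else tlpScan rest tlp_values

def most_restrictive_tlp_py_alt (tlp_values : List String) : String :=
  tlpScan tlpOrder.reverse tlp_values

-- ===== PRECONDITION & SPEC =====
def Spec_most_restrictive_tlp_py (tlp_values : List String) (out : String) : Prop := out = most_restrictive_tlp_py_alt tlp_values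
instance (tlp_values : List String) (out : String) : Decidable (Spec_most_restrictive_tlp_py tlp_values out) := by unfold Spec_most_restrictive_tlp_py; infer_instance

-- ===== CLAIM (what is proved, stated in full; the proofs are below) =====
def Claim_equal_most_restrictive_tlp_py : Prop := ∀ (tlp_values : List String), Dom_most_restrictive_tlp_py tlp_values → Spec_most_restrictive_tlp_py tlp_values (most_restrictive_tlp_py tlp_values)

-- ===== LEMMAS AND PROOFS =====

-- A's fold is characterised by membership of the three non-default labels.
theorem tlp_foldl_char (l : List String) : ∀ (h : Nat),
    l.foldl tlpStep h =
      if "TLP:RED" ∈ l then max h 3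
      else if "TLP:AMBER" ∈ l then max h 2
      else if "TLP:GREEN" ∈ l then max h 1
      else h := by
  induction l with
  | nil => intro h; simp
  | cons x t ih =>
    intro h
    simp only [List.foldl_cons, ih, List.mem_cons]
    by_cases hr : x = "TLP:RED"
    · subst hr
      simp only [tlpStep, show PySem.List.index? tlpOrder "TLP:RED" = some 3 from rfl]
      simp only [true_or, if_pos]
      split_ifs <;> omega
    · by_cases ha : x = "TLP:AMBER"
      · subst ha
        simp only [tlpStep, show PySem.List.index? tlpOrder "TLP:AMBER" = some 2 from rfl]
        simp [hr, Ne.symm hr] <;> split_ifs <;> omega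
      · by_cases hg : x = "TLP:GREEN"
        · subst hg
          simp only [tlpStep, show PySem.List.index? tlpOrder "TLP:GREEN" = some 1 from rfl]
          simp [hr, ha, Ne.symm hr, Ne.symm ha] <;> split_ifs <;> omega
        · by_cases hw : x = "TLP:WHITE"
          · subst hw
            simp only [tlpStep, show PySem.List.index? tlpOrder "TLP:WHITE" = some 0 from rfl]
            simp [hr, ha, hg, Ne.symm hr, Ne.symm ha, Ne.symm hg] <;> split_ifs <;> omega
          · have hnone : PySem.List.index? tlpOrder x = none := by
              rw [PySem.List.index?_eq_none_iff]
              simp [tlpOrder, hr, ha, hg, hw]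
            simp only [tlpStep, hnone]
            simp [hr, ha, hg, Ne.symm hr, Ne.symm ha, Ne.symm hg]

theorem most_restrictive_tlp_py_eq_alt (l : List String) :
    most_restrictive_tlp_py l = most_restrictive_tlp_py_alt l := by
  simp only [most_restrictive_tlp_py, most_restrictive_tlp_py_alt, tlp_foldl_char,
    tlpOrder, List.reverse, tlpScan]
  by_cases hr : "TLP:RED" ∈ l <;> by_cases ha : "TLP:AMBER" ∈ l <;>
    by_cases hg : "TLP:GREEN" ∈ l <;> by_cases hw : "TLP:WHITE" ∈ l <;>
    simp [hr, ha, hg, hw, tlpScan, tlpOrder]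

-- ===== VERDICT (by name: the statement is the Claim_ definition above) =====
theorem most_restrictive_tlp_py_spec : Claim_equal_most_restrictive_tlp_py := by
  intro l _
  exact most_restrictive_tlp_py_eq_alt l
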